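-- pv_equiv track=rewrite | github.com/sjoon2455/equimut_gen | parse.py | dividePathsLeaves
-- ===== SOURCE A (Python) =====
-- from collections import defaultdict
--
-- def dividePathsLeaves(paths):
--     paths_res = []
--     for path in paths:
--         tmp = defaultdict(list)
--         count = -1
--         collect = False
--         for line in path:
--             if "." in line and not any(c.isalpha() for c in line):
--                 count += 1
--                 collect = True
--             if collect:
--                 tmp[count].append(line)
--         res = tmp[count-1] + tmp[count]
--         paths_res.append(res)
--     return paths_res
-- ===== SOURCE B (Python) =====
-- def dividePathsLeaves(paths):
--     res = []
--     for path in paths: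
--         path = list(path)
--         seps = [i for i, line in enumerate(path)
--                 if "." in line and not any(c.isalpha() for c in line)]
--         if not seps:
--             res.append([])
--         else:
--             start = seps[-2] if len(seps) >= 2 else seps[-1]
--             res.append(path[start:])
--     return res
-- ===== Notes on version B (the rewrite author's own statement) =====
-- stated objective: simpler
-- what changed: Replaces A's incremental defaultdict grouping (count/collect state machine appending every line into per-separator buckets) by one pass collecting separator indices and a single suffix slice from the last-but-one (or only) separator.
import Mathlib
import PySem

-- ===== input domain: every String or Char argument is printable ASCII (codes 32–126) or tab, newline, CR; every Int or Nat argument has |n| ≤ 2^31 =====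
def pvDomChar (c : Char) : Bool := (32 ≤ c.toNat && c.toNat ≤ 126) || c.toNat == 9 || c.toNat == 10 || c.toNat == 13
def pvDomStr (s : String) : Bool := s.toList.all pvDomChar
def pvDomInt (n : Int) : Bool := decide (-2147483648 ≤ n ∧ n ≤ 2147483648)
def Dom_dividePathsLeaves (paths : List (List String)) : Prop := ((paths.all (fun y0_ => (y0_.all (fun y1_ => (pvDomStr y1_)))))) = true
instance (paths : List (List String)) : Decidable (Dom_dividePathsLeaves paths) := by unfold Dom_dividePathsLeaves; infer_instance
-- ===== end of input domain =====

-- B replaces A's incremental defaultdict grouping by a single separator-index pass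
-- and one suffix slice per path (objective: simpler; same asymptotic cost).

-- shared helper: the separator test both Pythons write literally
-- ('"." in line and not any(c.isalpha() for c in line)')
def pvIsSep (line : String) : Bool :=
  PySem.Str.isIn "." line && !(line.toList.any (fun c => PySem.Chars.isalpha c))

-- ===== PORT A =====
-- one iteration of A's inner loop: state (tmp, count, collect)
def pvStepA (st : PySem.Dict Int (List String) × Int × Bool) (line : String) :
    PySem.Dict Int (List String) × Int × Bool :=
  let tmp := st.1
  let count := st.2.1
  let collect := st.2.2
  let count := if pvIsSep line then count + 1 else count
  let collect := if pvIsSep line then true else collect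
  if collect then (tmp.modify count [] (fun g => g ++ [line]), count, collect)
  else (tmp, count, collect)

def dividePathsLeaves (paths : List (List String)) : List (List String) :=
  paths.foldl (fun acc path =>
    let st := path.foldl pvStepA (PySem.Dict.empty, -1, false)
    acc ++ [st.1.getD (st.2.1 - 1) [] ++ st.1.getD st.2.1 []]) []

-- ===== PORT B =====
-- Source B's separator-index comprehension
def pvSeps (path : List String) : List Int :=
  ((PySem.List.enumerate path 0).filter (fun p => pvIsSep p.2)).map (·.1)

-- Source B's 'start = seps[-2] if len(seps) >= 2 else seps[-1]'
def pvStart (s : List Int) : Int :=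
  if 2 ≤ s.length then (PySem.List.pyGet? s (-2)).getD 0
  else (PySem.List.pyGet? s (-1)).getD 0

def dividePathsLeaves_alt (paths : List (List String)) : List (List String) :=
  paths.foldl (fun res path =>
    let seps := pvSeps path
    if seps.isEmpty then res ++ [[]]
    else res ++ [PySem.List.slice path (some (pvStart seps)) none]) []

-- ===== PRECONDITION & SPEC =====
def Spec_dividePathsLeaves (paths : List (List String)) (out : List (List String)) : Prop := out = dividePathsLeaves_alt paths
instance (paths : List (List String)) (out : List (List String)) : Decidable (Spec_dividePathsLeaves paths out) := by unfold Spec_dividePathsLeaves; infer_instance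

-- ===== CLAIM (what is proved, stated in full; the proofs are below) =====
def Claim_equal_dividePathsLeaves : Prop := ∀ (paths : List (List String)), Dom_dividePathsLeaves paths → Spec_dividePathsLeaves paths (dividePathsLeaves paths)

-- ===== LEMMAS AND PROOFS =====

theorem pvSeps_append (l : List String) (x : String) :
    pvSeps (l ++ [x]) = pvSeps l ++ (if pvIsSep x then [(l.length : Int)] else []) := by
  simp [pvSeps, PySem.List.enumerate_append, PySem.List.enumerate_cons, PySem.List.enumerate_nil,
    List.filter_append]
  split <;> rename_i h <;> simp [List.filter, h]

theorem pvSeps_bounds (l : List String) : ∀ i ∈ pvSeps l, 0 ≤ i ∧ i < (l.length : Int) := by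
  intro i hi
  simp only [pvSeps, List.mem_map, List.mem_filter] at hi
  obtain ⟨p, ⟨hp, _⟩, rfl⟩ := hi
  rw [PySem.List.mem_enumerate_iff] at hp
  obtain ⟨k, hk, rfl⟩ := hp
  simp; omega

theorem pvLast_mem (s : List Int) (h : s ≠ []) : (PySem.List.pyGet? s (-1)).getD 0 ∈ s := by
  rw [PySem.List.pyGet?_neg_one, List.getLast?_eq_some_getLast h]
  simp [List.getLast_mem]

theorem pvStart_mem (s : List Int) (h : s ≠ []) : pvStart s ∈ s := by
  unfold pvStart
  split
  · rename_i h2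
    rw [show (-2 : Int) = -((2:Nat):Int) by norm_num,
      PySem.List.pyGet?_neg_natCast _ _ (by omega) (by omega)]
    have hlt : s.length - 2 < s.length := by omega
    simp [List.getElem?_eq_getElem hlt, List.getElem_mem]
  · exact pvLast_mem s h

theorem pvLast_append (s : List Int) (n : Int) :
    (PySem.List.pyGet? (s ++ [n]) (-1)).getD 0 = n := by
  simp [PySem.List.pyGet?_neg_one]

theorem pvStart_append (s : List Int) (h : s ≠ []) (n : Int) :
    pvStart (s ++ [n]) = (PySem.List.pyGet? s (-1)).getD 0 := by
  have hl : 1 ≤ s.length := List.length_pos_iff.mpr h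
  unfold pvStart
  rw [if_pos (by simp; omega)]
  rw [show (-2 : Int) = -((2:Nat):Int) by norm_num,
    PySem.List.pyGet?_neg_natCast _ _ (by omega) (by simpa using hl)]
  have h2 : (s ++ [n]).length - 2 = s.length - 1 := by simp
  have hlt : s.length - 1 < s.length := by omega
  rw [h2, List.getElem?_append_left (by omega), PySem.List.pyGet?_neg_one,
    List.getLast?_eq_some_getLast h, List.getLast_eq_getElem,
    List.getElem?_eq_getElem hlt]

-- invariant of A's inner loop, stated against B's separator list: the count is
-- #separators - 1, 'collect' says a separator was seen, keys above the count are unbound,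
-- the group at the count is the suffix from the last separator, and the last two groups
-- together form the suffix from B's start index
theorem pvInv (l : List String) :
    (l.foldl pvStepA (PySem.Dict.empty, -1, false)).2.1 = ((pvSeps l).length : Int) - 1 ∧
    (l.foldl pvStepA (PySem.Dict.empty, -1, false)).2.2 = !(pvSeps l).isEmpty ∧
    (∀ k : Int, ((pvSeps l).length : Int) - 1 < k →
      (l.foldl pvStepA (PySem.Dict.empty, -1, false)).1.getD k [] = []) ∧
    (pvSeps l = [] → (l.foldl pvStepA (PySem.Dict.empty, -1, false)).1 = PySem.Dict.empty) ∧
    (pvSeps l ≠ [] →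
      (l.foldl pvStepA (PySem.Dict.empty, -1, false)).1.getD (((pvSeps l).length : Int) - 1) []
        = l.drop (((PySem.List.pyGet? (pvSeps l) (-1)).getD 0).toNat) ∧
      (l.foldl pvStepA (PySem.Dict.empty, -1, false)).1.getD (((pvSeps l).length : Int) - 2) [] ++
      (l.foldl pvStepA (PySem.Dict.empty, -1, false)).1.getD (((pvSeps l).length : Int) - 1) []
        = l.drop ((pvStart (pvSeps l)).toNat)) := by
  induction l using List.reverseRecOn with
  | nil =>
    refine ⟨by simp [pvSeps, PySem.List.enumerate_nil], ?_, ?_, ?_, ?_⟩ <;>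
      simp [pvSeps, PySem.List.enumerate_nil, PySem.Dict.getD_empty]
  | append_singleton l x IH =>
    obtain ⟨IH1, IH2, IH3, IH4, IH5⟩ := IH
    set st := l.foldl pvStepA (PySem.Dict.empty, -1, false) with hst
    set s := pvSeps l with hs
    have hfold : (l ++ [x]).foldl pvStepA (PySem.Dict.empty, -1, false) = pvStepA st x := by
      simp [List.foldl_append, ← hst]
    have hsb := pvSeps_bounds l
    rw [← hs] at hsb
    by_cases hx : pvIsSep x = true
    · -- new separator
      have hs' : pvSeps (l ++ [x]) = s ++ [(l.length : Int)] := by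
        rw [pvSeps_append, if_pos hx, ← hs]
      have hstep : pvStepA st x =
          (st.1.modify (st.2.1 + 1) [] (fun g => g ++ [x]), st.2.1 + 1, true) := by
        simp [pvStepA, hx]
      rw [hfold, hstep, hs']
      have hlen : ((s ++ [(l.length : Int)]).length : Int) = (s.length : Int) + 1 := by simp
      refine ⟨?_, by simp, ?_, by simp, ?_⟩
      · show st.2.1 + 1 = _
        rw [IH1, hlen]; omega
      · intro k hk
        rw [hlen] at hk
        show (st.1.modify (st.2.1 + 1) [] (fun g => g ++ [x])).getD k [] = []
        rw [PySem.Dict.getD_modify, if_neg (by rw [IH1]; omega)]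
        exact IH3 k (by omega)
      · intro _
        have hcnt : (((s ++ [(l.length : Int)]).length : Int) - 1) = st.2.1 + 1 := by
          rw [IH1, hlen]; omega
        have hz : st.1.getD (st.2.1 + 1) [] = [] := by
          rw [IH1, show ((s.length : Int) - 1 + 1) = (s.length : Int) by omega]
          exact IH3 _ (by omega)
        have hself : (st.1.modify (st.2.1 + 1) [] (fun g => g ++ [x])).getD
            (((s ++ [(l.length : Int)]).length : Int) - 1) [] = [x] := by
          rw [hcnt, PySem.Dict.getD_modify, if_pos rfl, hz]
          rfl
        constructor
        · rw [hself, pvLast_append]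
          simp
        · rw [hself]
          have hne : ((s ++ [(l.length:Int)]).length : Int) - 2 ≠ st.2.1 + 1 := by
            rw [IH1, hlen]; omega
          show (st.1.modify (st.2.1 + 1) [] (fun g => g ++ [x])).getD _ [] ++ [x] = _
          rw [PySem.Dict.getD_modify, if_neg hne]
          by_cases hsn : s = []
          · rw [hsn]
            simp [PySem.Dict.getD_empty, IH4 hsn, pvStart, PySem.List.pyGet?_neg_one]
          · have hb := hsb _ (pvLast_mem s hsn)
            have heq2 : ((s ++ [(l.length:Int)]).length : Int) - 2 = (s.length : Int) - 1 := by
              rw [hlen]; omega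
            rw [heq2, (IH5 hsn).1, pvStart_append s hsn]
            rw [List.drop_append_of_le_length (by omega)]
    · -- not a separator
      have hs' : pvSeps (l ++ [x]) = s := by rw [pvSeps_append, if_neg hx, ← hs]; simp
      by_cases hc : st.2.2 = true
      · have hsn : s ≠ [] := by
          intro h0; rw [IH2, h0] at hc; simp at hc
        have hstep : pvStepA st x =
            (st.1.modify st.2.1 [] (fun g => g ++ [x]), st.2.1, st.2.2) := by
          simp [pvStepA, hx, hc]
        rw [hfold, hstep, hs']
        have hbl := hsb _ (pvLast_mem s hsn)
        have hbs := hsb _ (pvStart_mem s hsn)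
        refine ⟨IH1, IH2, ?_, fun h0 => absurd h0 hsn, ?_⟩
        · intro k hk
          show (st.1.modify st.2.1 [] (fun g => g ++ [x])).getD k [] = []
          rw [PySem.Dict.getD_modify, if_neg (by rw [IH1]; omega)]
          exact IH3 k hk
        · intro _
          have hself : (st.1.modify st.2.1 [] (fun g => g ++ [x])).getD ((s.length : Int) - 1) []
              = st.1.getD ((s.length : Int) - 1) [] ++ [x] := by
            rw [PySem.Dict.getD_modify, if_pos (by rw [IH1]), IH1]
          have hother : (st.1.modify st.2.1 [] (fun g => g ++ [x])).getD ((s.length : Int) - 2) []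
              = st.1.getD ((s.length : Int) - 2) [] := by
            rw [PySem.Dict.getD_modify, if_neg (by rw [IH1]; omega)]
          constructor
          · show (st.1.modify st.2.1 [] (fun g => g ++ [x])).getD _ [] = _
            rw [hself, (IH5 hsn).1, List.drop_append_of_le_length (by omega)]
          · show (st.1.modify st.2.1 [] (fun g => g ++ [x])).getD _ [] ++
                (st.1.modify st.2.1 [] (fun g => g ++ [x])).getD _ [] = _
            rw [hself, hother, ← List.append_assoc, (IH5 hsn).2,
              List.drop_append_of_le_length (by omega)]
      · have hsn : s = [] := by
          by_contra h0
          rw [IH2] at hc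
          simp [h0] at hc
        have hstep : pvStepA st x = st := by
          have hc' : st.2.2 = false := by revert hc; cases st.2.2 <;> simp
          simp [pvStepA, hx, hc']
          rw [← hc']
        rw [hfold, hstep, hs']
        exact ⟨IH1, IH2, IH3, IH4, fun h0 => absurd hsn h0⟩

-- per-path agreement of the two bodies
theorem pvPerPath (path : List String) :
    (let st := path.foldl pvStepA (PySem.Dict.empty, -1, false)
     st.1.getD (st.2.1 - 1) [] ++ st.1.getD st.2.1 []) =
    (let seps := pvSeps path
     if seps.isEmpty then ([] : List String)
     else PySem.List.slice path (some (pvStart seps)) none) := by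
  obtain ⟨I1, _, _, I4, I5⟩ := pvInv path
  by_cases hemp : pvSeps path = []
  · simp only [hemp, List.isEmpty_nil, if_pos]
    rw [I4 hemp]
    simp [PySem.Dict.getD_empty]
  · have hb := pvSeps_bounds path _ (pvStart_mem _ hemp)
    simp only [List.isEmpty_iff, if_neg hemp]
    rw [PySem.List.slice_from _ hb.1, I1,
      show ((pvSeps path).length : Int) - 1 - 1 = ((pvSeps path).length : Int) - 2 by omega]
    exact (I5 hemp).2

-- ===== VERDICT (by name: the statement is the Claim_ definition above) =====
theorem dividePathsLeaves_spec : Claim_equal_dividePathsLeaves := by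
  intro paths _
  show dividePathsLeaves paths = dividePathsLeaves_alt paths
  unfold dividePathsLeaves dividePathsLeaves_alt
  have h1 := PySem.List.foldl_append_singleton_eq_map
    (f := fun path => (let st := path.foldl pvStepA (PySem.Dict.empty, -1, false)
      st.1.getD (st.2.1 - 1) [] ++ st.1.getD st.2.1 [])) (l := paths) (acc := [])
  have h2 := PySem.List.foldl_append_singleton_eq_map
    (f := fun path => (let seps := pvSeps path
      if seps.isEmpty then ([] : List String)
      else PySem.List.slice path (some (pvStart seps)) none)) (l := paths) (acc := [])
  simp only at h1 h2 ⊢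
  rw [show (fun (res : List (List String)) path =>
      if (pvSeps path).isEmpty then res ++ [[]]
      else res ++ [PySem.List.slice path (some (pvStart (pvSeps path))) none]) =
    (fun res path => res ++ [if (pvSeps path).isEmpty then []
      else PySem.List.slice path (some (pvStart (pvSeps path))) none]) from by
      funext res path; split <;> rfl]
  rw [h1, h2]
  simp only [List.nil_append]
  exact List.map_congr_left (fun path _ => pvPerPath path)
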